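-- pv_equiv track=rewrite | github.com/ncudlenco/multiagent_story_system | agents/scene_detail_agent.py | _has_next_temporal_cycles
-- ===== SOURCE A (Python) =====
-- from typing import Dict, Any, Optional
--
-- def _has_next_temporal_cycles(temporal: Dict[str, Any]) -> bool:
--     """Check for cycles in the temporal structure.
--
--     Args:
--         temporal: Temporal structure from GEST
--
--     Returns:
--         True if cycles are detected, False otherwise
--     """
--     visited = set()
--     rec_stack = set()
--
--     def visit(event_id: str) -> bool:
--         if event_id in rec_stack:
--             return True  # Cycle detected
--         if event_id in visited:
--             return False
--
--         visited.add(event_id)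
--         rec_stack.add(event_id)
--
--         entry = temporal.get(event_id)
--         if entry and isinstance(entry, dict):
--             next_event_id = entry.get('next')
--             if next_event_id and visit(next_event_id):
--                 return True
--
--         rec_stack.remove(event_id)
--         return False
--
--     for event_id in temporal.keys():
--         if event_id != 'starting_actions' and visit(event_id):
--             return True
--
--     return False
-- ===== SOURCE B (Python) =====
-- def _has_next_temporal_cycles(temporal) -> bool:
--     """Cycle check by bounded chain-walking: a 'next'-chain can take
--     len(temporal) + 1 successful steps iff it runs into a cycle (pigeonhole:
--     every node with a successor is a key of temporal)."""
--
--     def step(node):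
--         entry = temporal.get(node)
--         if entry and isinstance(entry, dict):
--             nxt = entry.get('next')
--             if nxt:
--                 return nxt
--         return None
--
--     limit = len(temporal) + 1
--     for start in temporal:
--         if start == 'starting_actions':
--             continue
--         node = start
--         for _ in range(limit):
--             node = step(node)
--             if node is None:
--                 break
--         else:
--             return True
--     return False
-- ===== Notes on version B (the rewrite author's own statement) =====
-- stated objective: alternative
-- what changed: Replaces the recursive DFS with shared visited/rec_stack sets by a per-key bounded chain walk with no sets at all: a 'next'-chain that survives len(temporal)+1 steps must repeat a key (pigeonhole), so cycle detection becomes a plain counted loop.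
import Mathlib
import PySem

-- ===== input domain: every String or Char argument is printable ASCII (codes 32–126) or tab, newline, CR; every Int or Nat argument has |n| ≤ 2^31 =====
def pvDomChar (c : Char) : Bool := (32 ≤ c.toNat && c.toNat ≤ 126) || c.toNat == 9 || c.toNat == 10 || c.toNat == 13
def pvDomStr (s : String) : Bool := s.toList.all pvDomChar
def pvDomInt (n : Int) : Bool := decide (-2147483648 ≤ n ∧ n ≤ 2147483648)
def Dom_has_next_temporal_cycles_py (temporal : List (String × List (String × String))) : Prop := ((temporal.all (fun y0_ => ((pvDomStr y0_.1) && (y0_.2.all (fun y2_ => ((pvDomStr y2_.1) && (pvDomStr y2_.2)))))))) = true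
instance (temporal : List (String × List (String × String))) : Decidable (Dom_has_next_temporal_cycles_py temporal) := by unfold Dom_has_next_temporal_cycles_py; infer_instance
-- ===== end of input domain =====

-- B replaces A's shared-visited recursive DFS by a per-key bounded chain walk
-- (pigeonhole: len(temporal)+1 successful steps means a cycle); objective: alternative.

-- ===== PORT A =====
-- A's inner recursive `visit(event_id)`: state (visited, rec_stack) threaded
-- functionally (rec_stack is restored on a False return in Python, so passing it
-- down unchanged is exact). The fuel argument only guards termination; it is
-- proven sufficient (recursion depth never exceeds #unvisited keys + 1), so the
-- fuel-0 branch is unreachable from `loopA`.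
def visitA (temporal : List (String × List (String × String))) :
    Nat → PySem.Set String → PySem.Set String → String → Bool × PySem.Set String
  | 0, visited, _, _ => (false, visited)
  | fuel+1, visited, recStack, eventId =>
    if PySem.Set.contains recStack eventId then (true, visited)       -- cycle detected
    else if PySem.Set.contains visited eventId then (false, visited)
    else
      let visited' := PySem.Set.add visited eventId
      let recStack' := PySem.Set.add recStack eventId
      match (PySem.Dict.mk temporal).get? eventId with                -- entry = temporal.get(event_id)
      | none => (false, visited')
      | some entry =>
        if entry = [] then (false, visited')                          -- `if entry and isinstance(entry, dict)`: entry is always a dict here, truthy = nonempty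
        else match (PySem.Dict.mk entry).get? "next" with             -- next_event_id = entry.get('next')
          | none => (false, visited')
          | some nxt =>
            if nxt = "" then (false, visited')                        -- truthy check on next_event_id
            else visitA temporal fuel visited' recStack' nxt          -- if next_event_id and visit(next_event_id)

-- A's top-level `for event_id in temporal.keys()` loop with early return,
-- threading the shared `visited` set.
def loopA (temporal : List (String × List (String × String))) :
    List (String × List (String × String)) → PySem.Set String → Bool
  | [], _ => false
  | kv :: rest, visited =>
    if kv.1 ≠ "starting_actions" then
      match visitA temporal (temporal.length + 1) visited PySem.Set.empty kv.1 with
      | (true, _) => true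
      | (false, visited') => loopA temporal rest visited'
    else loopA temporal rest visited

def has_next_temporal_cycles_py (temporal : List (String × List (String × String))) : Bool :=
  loopA temporal temporal PySem.Set.empty

-- ===== PORT B =====
-- B's `step(node)`: the unique truthy successor of a node, or none.
def pvStep (temporal : List (String × List (String × String))) (node : String) : Option String :=
  match (PySem.Dict.mk temporal).get? node with
  | some entry =>
    if entry = [] then none
    else match (PySem.Dict.mk entry).get? "next" with
      | some nxt => if nxt = "" then none else some nxt
      | none => none
  | none => none

-- B's inner `for _ in range(limit)` walk with for-else: true iff `limit`
-- consecutive steps all succeed.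
def walkB (temporal : List (String × List (String × String))) : Nat → String → Bool
  | 0, _ => true
  | k+1, node =>
    match pvStep temporal node with
    | none => false
    | some nxt => walkB temporal k nxt

def has_next_temporal_cycles_py_alt (temporal : List (String × List (String × String))) : Bool :=
  temporal.any (fun kv =>
    if kv.1 = "starting_actions" then false
    else walkB temporal (temporal.length + 1) kv.1)

-- ===== PRECONDITION & SPEC =====
def Spec_has_next_temporal_cycles_py (temporal : List (String × List (String × String))) (out : Bool) : Prop := out = has_next_temporal_cycles_py_alt temporal
instance (temporal : List (String × List (String × String))) (out : Bool) : Decidable (Spec_has_next_temporal_cycles_py temporal out) := by unfold Spec_has_next_temporal_cycles_py; infer_instance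

-- ===== CLAIM (what is proved, stated in full; the proofs are below) =====
def Claim_equal_has_next_temporal_cycles_py : Prop := ∀ (temporal : List (String × List (String × String))), Dom_has_next_temporal_cycles_py temporal → Spec_has_next_temporal_cycles_py temporal (has_next_temporal_cycles_py temporal)

-- ===== LEMMAS AND PROOFS =====

-- k-fold iteration of pvStep (proof-side notion).
def iterS (temporal : List (String × List (String × String))) : Nat → String → Option String
  | 0, e => some e
  | k+1, e => match pvStep temporal e with
    | none => none
    | some e' => iterS temporal k e'

-- "e reaches a cycle": the chain from e never dies.
def Cyc (temporal : List (String × List (String × String))) (e : String) : Prop :=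
  ∀ k, (iterS temporal k e).isSome = true

lemma iterS_one (t : List (String × List (String × String))) (e : String) :
    iterS t 1 e = pvStep t e := by
  simp only [iterS]; cases pvStep t e <;> rfl

lemma iterS_add (t : List (String × List (String × String))) (a b : Nat) (e : String) :
    iterS t (a + b) e = (iterS t a e).bind (iterS t b) := by
  induction a generalizing e with
  | zero => simp [iterS]
  | succ a ih =>
    have : a + 1 + b = (a + b) + 1 := by omega
    rw [this]
    simp only [iterS]
    cases pvStep t e with
    | none => rfl
    | some e' => exact ih e'

lemma isSome_iterS_prefix (t : List (String × List (String × String))) (a b : Nat) (e : String)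
    (h : (iterS t (a + b) e).isSome = true) : (iterS t a e).isSome = true := by
  rw [iterS_add] at h
  cases hx : iterS t a e with
  | none => rw [hx] at h; simp at h
  | some _ => rfl

lemma walkB_eq_isSome (t : List (String × List (String × String))) :
    ∀ k e, walkB t k e = (iterS t k e).isSome := by
  intro k
  induction k with
  | zero => intro e; rfl
  | succ k ih =>
    intro e
    simp only [walkB, iterS]
    cases pvStep t e with
    | none => rfl
    | some e' => exact ih e'

lemma cyc_of_fixpt (t : List (String × List (String × String))) (e : String) (j : Nat)
    (hj : 1 ≤ j) (h : iterS t j e = some e) : Cyc t e := by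
  have hm : ∀ m, iterS t (m * j) e = some e := by
    intro m
    induction m with
    | zero => simp [iterS]
    | succ m ih =>
      have : (m + 1) * j = m * j + j := by ring
      rw [this, iterS_add, ih, Option.bind_some, h]
  intro k
  have hk : k ≤ (k + 1) * j := by nlinarith
  obtain ⟨b, hb⟩ := Nat.le.dest hk
  apply isSome_iterS_prefix t k b
  rw [hb, hm]
  rfl

lemma cyc_of_reach (t : List (String × List (String × String))) (e x : String) (j : Nat)
    (h : iterS t j e = some x) (hc : Cyc t x) : Cyc t e := by
  intro k
  rcases Nat.lt_or_ge j k with hk | hk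
  · obtain ⟨b, hb⟩ := Nat.le.dest hk.le
    rw [← hb, iterS_add, h, Option.bind_some]
    exact hc b
  · obtain ⟨b, hb⟩ := Nat.le.dest hk
    apply isSome_iterS_prefix t k b
    rw [hb, h]
    rfl

lemma not_cyc_of_step_none (t : List (String × List (String × String))) (e : String)
    (h : pvStep t e = none) : ¬ Cyc t e := by
  intro hc
  have := hc 1
  rw [iterS_one, h] at this
  simp at this

lemma cyc_shift (t : List (String × List (String × String))) (e e' : String)
    (h : pvStep t e = some e') : Cyc t e ↔ Cyc t e' := by
  constructor
  · intro hc k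
    have := hc (k + 1)
    have h1 : k + 1 = 1 + k := by omega
    rw [h1, iterS_add, iterS_one, h, Option.bind_some] at this
    exact this
  · intro hc k
    cases k with
    | zero => rfl
    | succ k =>
      have h1 : k + 1 = 1 + k := by omega
      rw [h1, iterS_add, iterS_one, h, Option.bind_some]
      exact hc k

lemma step_mem_keys (t : List (String × List (String × String))) (e e' : String)
    (h : pvStep t e = some e') : e ∈ t.map Prod.fst := by
  by_contra hmem
  have hk : e ∉ (PySem.Dict.mk t).keys := by
    simpa [PySem.Dict.keys_mk] using hmem
  have hn : (PySem.Dict.mk t).get? e = none :=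
    (PySem.Dict.get?_eq_none_iff_not_mem_keys _ _).mpr hk
  rw [pvStep, hn] at h
  simp at h

-- pigeonhole: surviving length+1 steps means the chain never dies
lemma cyc_of_long (t : List (String × List (String × String))) (e : String)
    (h : (iterS t (t.length + 1) e).isSome = true) : Cyc t e := by
  set n := t.length with hn
  have hj : ∀ j, j ≤ n + 1 → (iterS t j e).isSome = true := by
    intro j hjle
    obtain ⟨b, hb⟩ := Nat.le.dest hjle
    apply isSome_iterS_prefix t j b
    rw [hb]; exact h
  let f : Fin (n + 1) → String := fun j => (iterS t j e).get (hj j (by omega))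
  have hf : ∀ j : Fin (n + 1), iterS t j e = some (f j) := by
    intro j; simp [f]
  have hmaps : ∀ j : Fin (n + 1), f j ∈ (t.map Prod.fst).toFinset := by
    intro j
    have hsucc : (iterS t (j + 1) e).isSome = true := hj (j + 1) (by omega)
    rw [iterS_add, hf j, Option.bind_some, iterS_one] at hsucc
    cases hs : pvStep t (f j) with
    | none => rw [hs] at hsucc; simp at hsucc
    | some y => exact List.mem_toFinset.mpr (step_mem_keys t (f j) y hs)
  have hcard : ((t.map Prod.fst).toFinset).card < (Finset.univ : Finset (Fin (n + 1))).card := by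
    have h1 : ((t.map Prod.fst).toFinset).card ≤ (t.map Prod.fst).length := List.toFinset_card_le _
    simp only [List.length_map] at h1
    simp only [Finset.card_univ, Fintype.card_fin]
    omega
  obtain ⟨i, -, j, -, hij, hfeq⟩ :=
    Finset.exists_ne_map_eq_of_card_lt_of_maps_to hcard (fun j _ => hmaps j)
  -- wlog i < j
  rcases lt_or_gt_of_ne hij with hlt | hlt
  all_goals {
    first
    | (have hi := hf i; have hjj := hf j;
       have hd : (j : Nat) = i + ((j : Nat) - i) := by omega
       rw [hd, iterS_add, hi, Option.bind_some] at hjj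
       rw [hfeq] at hjj
       have hcyc : Cyc t (f j) := cyc_of_fixpt t (f j) ((j : Nat) - i) (by omega) hjj
       exact cyc_of_reach t e (f j) i (hfeq ▸ hi) hcyc)
    | (have hi := hf j; have hjj := hf i;
       have hd : (i : Nat) = j + ((i : Nat) - j) := by omega
       rw [hd, iterS_add, hi, Option.bind_some] at hjj
       rw [← hfeq] at hjj
       have hcyc : Cyc t (f i) := cyc_of_fixpt t (f i) ((i : Nat) - j) (by omega) hjj
       exact cyc_of_reach t e (f i) j (hfeq ▸ hi) hcyc)
  }

lemma cyc_iff_walk (t : List (String × List (String × String))) (e : String) :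
    Cyc t e ↔ walkB t (t.length + 1) e = true := by
  rw [walkB_eq_isSome]
  exact ⟨fun h => h _, cyc_of_long t e⟩

-- one unfolding of visitA in the "fresh node" case, phrased through pvStep
lemma visitA_step (t : List (String × List (String × String))) (fuel : Nat)
    (V R : PySem.Set String) (e : String)
    (hR : PySem.Set.contains R e = false) (hV : PySem.Set.contains V e = false) :
    visitA t (fuel + 1) V R e =
      match pvStep t e with
      | none => (false, PySem.Set.add V e)
      | some nxt => visitA t fuel (PySem.Set.add V e) (PySem.Set.add R e) nxt := by
  simp only [visitA, hR, hV, Bool.false_eq_true, if_false, pvStep]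
  cases (PySem.Dict.mk t).get? e with
  | none => rfl
  | some entry =>
    by_cases h1 : entry = []
    · simp [h1]
    · simp only [h1, if_false]
      cases (PySem.Dict.mk entry).get? "next" with
      | none => rfl
      | some nxt =>
        by_cases h2 : nxt = ""
        · simp [h2]
        · simp [h2]

-- main invariant lemma for A's `visit`
lemma visitA_spec (t : List (String × List (String × String))) :
    ∀ (fuel : Nat) (V R : PySem.Set String) (e s : String) (i : Nat),
    ((t.map Prod.fst).filter (fun k => !(PySem.Set.contains V k))).length + 1 ≤ fuel →
    iterS t i s = some e →
    (∀ x, x ∈ R ↔ ∃ j, j < i ∧ iterS t j s = some x) →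
    (∀ v, v ∈ V → v ∈ R ∨ ¬ Cyc t v) →
    ((visitA t fuel V R e).1 = true ↔ Cyc t e) ∧
    ((visitA t fuel V R e).1 = false →
      ∀ v, v ∈ (visitA t fuel V R e).2 → v ∈ R ∨ ¬ Cyc t v) := by
  intro fuel
  induction fuel with
  | zero => intro V R e s i hfuel; omega
  | succ fuel ih =>
    intro V R e s i hfuel hs hR hV
    by_cases heR : e ∈ R
    · -- rec_stack hit: cycle
      have hc : visitA t (fuel + 1) V R e = (true, V) := by
        simp [visitA, heR]
      rw [hc]
      refine ⟨⟨fun _ => ?_, fun _ => rfl⟩, by simp⟩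
      obtain ⟨j, hji, hj⟩ := (hR e).mp heR
      have hd : i = j + (i - j) := by omega
      rw [hd, iterS_add, hj, Option.bind_some] at hs
      exact cyc_of_fixpt t e (i - j) (by omega) hs
    · by_cases heV : e ∈ V
      · -- visited hit: no cycle from e
        have hc : visitA t (fuel + 1) V R e = (false, V) := by
          simp [visitA, heR, heV]
        rw [hc]
        have hnc : ¬ Cyc t e := (hV e heV).resolve_left heR
        exact ⟨by simp [hnc], fun _ v hv => hV v hv⟩
      · have hRb : PySem.Set.contains R e = false := by
          rw [Bool.eq_false_iff]; exact mt (PySem.Set.contains_iff R e).mp heR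
        have hVb : PySem.Set.contains V e = false := by
          rw [Bool.eq_false_iff]; exact mt (PySem.Set.contains_iff V e).mp heV
        rw [visitA_step t fuel V R e hRb hVb]
        cases hstep : pvStep t e with
        | none =>
          have hnc : ¬ Cyc t e := not_cyc_of_step_none t e hstep
          refine ⟨by simp [hnc], fun _ v hv => ?_⟩
          rcases (PySem.Set.mem_add V e v).mp hv with h | h
          · exact hV v h
          · exact Or.inr (h ▸ hnc)
        | some nxt =>
          -- recursive call with e pushed on both sets
          have hekeys : e ∈ t.map Prod.fst := step_mem_keys t e nxt hstep
          have hfuel' :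
              ((t.map Prod.fst).filter (fun k => !(PySem.Set.contains (PySem.Set.add V e) k))).length + 1 ≤ fuel := by
            have hmono : ∀ k : String, PySem.Set.contains V k = true →
                PySem.Set.contains (PySem.Set.add V e) k = true := fun k hkv =>
              (PySem.Set.contains_iff _ _).mpr
                ((PySem.Set.mem_add V e k).mpr (Or.inl ((PySem.Set.contains_iff _ _).mp hkv)))
            have hsub : ∀ k, (!(PySem.Set.contains (PySem.Set.add V e) k)) = true →
                (!(PySem.Set.contains V k)) = true := by
              intro k hk
              cases hkv : PySem.Set.contains V k with
              | false => rfl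
              | true =>
                rw [Bool.not_eq_true'] at hk
                rw [hmono k hkv] at hk
                exact absurd hk (by decide)
            have hlt :
                ((t.map Prod.fst).filter (fun k => !(PySem.Set.contains (PySem.Set.add V e) k))).length <
                ((t.map Prod.fst).filter (fun k => !(PySem.Set.contains V k))).length := by
              have heq : (t.map Prod.fst).filter (fun k => !(PySem.Set.contains (PySem.Set.add V e) k)) =
                  ((t.map Prod.fst).filter (fun k => !(PySem.Set.contains V k))).filter
                    (fun k => !(PySem.Set.contains (PySem.Set.add V e) k)) := by
                rw [List.filter_filter]
                apply List.filter_congr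
                intro k _
                cases hk : (!(PySem.Set.contains (PySem.Set.add V e) k)) with
                | false => rfl
                | true =>
                  have hnv : k ∉ V := by
                    have h' := hsub k hk
                    rw [Bool.not_eq_true'] at h'
                    rw [Bool.eq_false_iff] at h'
                    exact fun hm => h' ((PySem.Set.contains_iff V k).mpr hm)
                  simp [hnv]
              rw [heq]
              apply List.length_filter_lt_length_iff_exists.mpr
              refine ⟨e, List.mem_filter.mpr ⟨hekeys, by rw [Bool.not_eq_true']; exact hVb⟩, ?_⟩
              rw [Bool.not_eq_true', Bool.not_eq_false]
              exact (PySem.Set.contains_iff _ _).mpr ((PySem.Set.mem_add V e e).mpr (Or.inr rfl))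
            omega
          have hs' : iterS t (i + 1) s = some nxt := by
            rw [iterS_add, hs, Option.bind_some, iterS_one, hstep]
          have hR' : ∀ x, x ∈ PySem.Set.add R e ↔ ∃ j, j < i + 1 ∧ iterS t j s = some x := by
            intro x
            rw [PySem.Set.mem_add]
            constructor
            · rintro (hx | rfl)
              · obtain ⟨j, hji, hj⟩ := (hR x).mp hx
                exact ⟨j, by omega, hj⟩
              · exact ⟨i, by omega, hs⟩
            · rintro ⟨j, hji, hj⟩
              rcases Nat.lt_succ_iff_lt_or_eq.mp hji with hji' | rfl
              · exact Or.inl ((hR x).mpr ⟨j, hji', hj⟩)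
              · right
                rw [hs] at hj
                exact (Option.some_inj.mp hj).symm
          have hV' : ∀ v, v ∈ PySem.Set.add V e → v ∈ PySem.Set.add R e ∨ ¬ Cyc t v := by
            intro v hv
            rcases (PySem.Set.mem_add V e v).mp hv with h | heq
            · rcases hV v h with h' | h'
              · exact Or.inl ((PySem.Set.mem_add R e v).mpr (Or.inl h'))
              · exact Or.inr h'
            · exact Or.inl ((PySem.Set.mem_add R e v).mpr (Or.inr heq))
          obtain ⟨ih1, ih2⟩ := ih (PySem.Set.add V e) (PySem.Set.add R e) nxt s (i + 1)
            hfuel' hs' hR' hV'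
          have hshift : Cyc t e ↔ Cyc t nxt := cyc_shift t e nxt hstep
          refine ⟨by rw [ih1, hshift], fun hb v hv => ?_⟩
          rcases ih2 hb v hv with h | h
          · rcases (PySem.Set.mem_add R e v).mp h with h' | heq
            · exact Or.inl h'
            · refine Or.inr ?_
              rw [heq]
              intro hcyc
              have hnx : (visitA t fuel (PySem.Set.add V e) (PySem.Set.add R e) nxt).1 = true :=
                ih1.mpr (hshift.mp hcyc)
              rw [hb] at hnx
              exact Bool.false_ne_true hnx
          · exact Or.inr h

-- A's top loop computes exactly B's `any` of bounded walks
lemma loopA_spec (t : List (String × List (String × String))) :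
    ∀ (rest : List (String × List (String × String))) (V : PySem.Set String),
    (∀ v, v ∈ V → ¬ Cyc t v) →
    loopA t rest V = rest.any (fun kv =>
      if kv.1 = "starting_actions" then false
      else walkB t (t.length + 1) kv.1) := by
  intro rest
  induction rest with
  | nil => intro V _; rfl
  | cons kv rest ih =>
    intro V hV
    by_cases hsa : kv.1 = "starting_actions"
    · simp only [loopA, hsa, ne_eq, not_true_eq_false, if_false, List.any_cons, if_true,
        Bool.false_or]
      exact ih V hV
    · have hspec := visitA_spec t (t.length + 1) V PySem.Set.empty kv.1 kv.1 0
        (by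
          have := List.length_filter_le (fun k => !(PySem.Set.contains V k)) (t.map Prod.fst)
          simp only [List.length_map] at this
          omega)
        rfl
        (by intro x; constructor
            · intro hx; exact absurd hx (List.not_mem_nil)
            · rintro ⟨j, hj, -⟩; omega)
        (fun v hv => Or.inr (hV v hv))
      obtain ⟨h1, h2⟩ := hspec
      simp only [loopA, hsa, ne_eq, not_false_iff, if_true, List.any_cons, if_false]
      rcases hres : visitA t (t.length + 1) V PySem.Set.empty kv.1 with ⟨b, V'⟩
      rw [hres] at h1 h2
      cases b with
      | true =>
        have hcyc : Cyc t kv.1 := h1.mp rfl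
        rw [(cyc_iff_walk t kv.1).mp hcyc]
        rfl
      | false =>
        have hnc : ¬ Cyc t kv.1 := by
          intro hc
          have hfalse := h1.mpr hc
          simp at hfalse
        have hw : walkB t (t.length + 1) kv.1 = false := by
          rw [Bool.eq_false_iff]
          intro hw
          exact hnc ((cyc_iff_walk t kv.1).mpr hw)
        rw [hw]
        simp only [Bool.false_or]
        exact ih V' (fun v hv => by
          rcases h2 rfl v hv with h | h
          · exact absurd h (List.not_mem_nil)
          · exact h)

-- ===== VERDICT (by name: the statement is the Claim_ definition above) =====
theorem has_next_temporal_cycles_py_spec : Claim_equal_has_next_temporal_cycles_py := by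
  intro temporal _
  unfold Spec_has_next_temporal_cycles_py has_next_temporal_cycles_py has_next_temporal_cycles_py_alt
  exact loopA_spec temporal temporal PySem.Set.empty
    (fun v hv => absurd hv (List.not_mem_nil))
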